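-- pv_equiv track=rewrite | github.com/EvgeniyPusser/Python | lesson12_HW.py | search_min_positive
-- ===== SOURCE A (Python) =====
-- def search_min_positive(A):
--     min_p = 0
--     for i in A:
--         if i >= 0:
--             min_p = i
--             break
--
--     for i in A:
--         if min_p >= i >= 0:
--             min_p = i
--     return min_p
-- ===== SOURCE B (Python) =====
-- def search_min_positive(A):
--     for x in sorted(A):
--         if x >= 0:
--             return x
--     return 0
-- ===== Notes on version B (the rewrite author's own statement) =====
-- stated objective: alternative
-- what changed: Replaces A's two linear passes (find the first non-negative element, then scan lowering the running minimum) with a sort-then-scan algorithm: sort the list and return the first non-negative element (the sorted order makes it the minimum of the non-negatives), 0 if none exists.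
import Mathlib
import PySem

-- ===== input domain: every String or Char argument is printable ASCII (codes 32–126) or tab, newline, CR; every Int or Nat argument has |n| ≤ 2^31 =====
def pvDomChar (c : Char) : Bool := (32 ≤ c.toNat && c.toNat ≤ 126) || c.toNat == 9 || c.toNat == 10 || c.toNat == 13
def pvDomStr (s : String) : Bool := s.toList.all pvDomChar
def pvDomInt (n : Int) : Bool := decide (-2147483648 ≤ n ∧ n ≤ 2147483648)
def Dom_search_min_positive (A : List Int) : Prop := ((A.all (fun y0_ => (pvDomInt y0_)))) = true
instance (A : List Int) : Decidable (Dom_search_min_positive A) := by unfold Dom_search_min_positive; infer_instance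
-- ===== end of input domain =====

-- B sorts the list and returns the first non-negative element (0 if none); objective: alternative (sort-then-scan).

-- ===== PORT A =====
-- first loop of A: min_p = 0; for i in A: if i >= 0: min_p = i; break
def pvFirstNonneg : List Int → Int
  | [] => 0
  | x :: xs => if x ≥ 0 then x else pvFirstNonneg xs

-- second loop of A: for i in A: if min_p >= i >= 0: min_p = i
def search_min_positive (A : List Int) : Int :=
  A.foldl (fun min_p i => if min_p ≥ i ∧ i ≥ 0 then i else min_p) (pvFirstNonneg A)

-- ===== PORT B =====
-- for x in sorted(A): if x >= 0: return x;  return 0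
def search_min_positive_alt (A : List Int) : Int :=
  match (PySem.List.sorted A (fun x => x) false).find? (fun x => decide (x ≥ 0)) with
  | some x => x
  | none => 0

-- ===== PRECONDITION & SPEC =====
def Spec_search_min_positive (A : List Int) (out : Int) : Prop := out = search_min_positive_alt A
instance (A : List Int) (out : Int) : Decidable (Spec_search_min_positive A out) := by unfold Spec_search_min_positive; infer_instance

-- ===== CLAIM =====
def Claim_equal_search_min_positive : Prop := ∀ (A : List Int), Dom_search_min_positive A → Spec_search_min_positive A (search_min_positive A)

-- ===== LEMMAS AND PROOFS =====

-- A's second loop is the running-min over the non-negative elements.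
theorem pvFoldA_eq_foldMin (A : List Int) (m : Int) :
    A.foldl (fun min_p i => if min_p ≥ i ∧ i ≥ 0 then i else min_p) m
      = (A.filter (fun i => decide (i ≥ 0))).foldl min m := by
  induction A generalizing m with
  | nil => rfl
  | cons x xs ih =>
    simp only [List.foldl_cons, List.filter_cons]
    by_cases hx : x ≥ 0
    · rw [decide_eq_true hx, if_pos rfl, List.foldl_cons]
      by_cases hm : m ≥ x
      · rw [if_pos ⟨hm, hx⟩, ih, min_eq_right hm]
      · rw [if_neg (fun h => hm h.1), ih, min_eq_left (le_of_not_ge hm)]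
    · rw [if_neg (by tauto), decide_eq_false hx]
      exact ih m

-- A's first loop returns the head of the non-negative filter (0 if none).
theorem pvFirstNonneg_filter (A : List Int) :
    pvFirstNonneg A = ((A.filter (fun i => decide (i ≥ 0))).headI) := by
  induction A with
  | nil => rfl
  | cons x xs ih =>
    simp only [pvFirstNonneg, List.filter_cons]
    by_cases hx : x ≥ 0
    · simp [hx]
    · simpa [hx] using ih

-- In a ≤-sorted list, a successful find? yields a member satisfying the predicate
-- that is a lower bound of all elements satisfying it.
theorem pvFind_props {l : List Int} {p : Int → Bool} {m : Int}
    (hs : l.Pairwise (· ≤ ·)) (h : l.find? p = some m) :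
    m ∈ l ∧ p m = true ∧ ∀ y ∈ l, p y = true → m ≤ y := by
  induction l with
  | nil => simp at h
  | cons x t ih =>
    rw [List.find?] at h
    rcases List.pairwise_cons.mp hs with ⟨hx, ht⟩
    cases hpx : p x with
    | true =>
      rw [hpx] at h
      cases h
      refine ⟨List.mem_cons_self, hpx, ?_⟩
      intro y hy _
      rcases List.mem_cons.mp hy with rfl | hy'
      · exact le_refl _
      · exact hx y hy' 
    | false =>
      rw [hpx] at h
      rcases ih ht h with ⟨hmem, hpm, hlb⟩
      refine ⟨List.mem_cons_of_mem _ hmem, hpm, ?_⟩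
      intro y hy hpy
      rcases List.mem_cons.mp hy with rfl | hy'
      · rw [hpy] at hpx; cases hpx
      · exact hlb y hy' hpy

-- ===== VERDICT =====
theorem search_min_positive_spec : Claim_equal_search_min_positive := by
  intro A _
  unfold Spec_search_min_positive search_min_positive search_min_positive_alt
  rw [pvFoldA_eq_foldMin, pvFirstNonneg_filter]
  have hperm := PySem.List.sorted_perm A (fun x => x) false
  have hpair := PySem.List.sorted_pairwise A (fun x => x)
  cases hf : A.filter (fun i => decide (i ≥ 0)) with
  | nil =>
    have hnone : (PySem.List.sorted A (fun x => x) false).find? (fun x => decide (x ≥ 0)) = none := by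
      rw [List.find?_eq_none]
      intro y hy hpy
      have hyA : y ∈ A := hperm.mem_iff.mp hy
      have : y ∈ A.filter (fun i => decide (i ≥ 0)) := List.mem_filter.mpr ⟨hyA, hpy⟩
      rw [hf] at this; simp at this
    simp [hnone]
  | cons h t =>
    have hhf : h ∈ A.filter (fun i => decide (i ≥ 0)) := by rw [hf]; exact List.mem_cons_self
    have hhA : h ∈ A := (List.mem_filter.mp hhf).1
    have hh0 : (decide (h ≥ 0)) = true := (List.mem_filter.mp hhf).2
    cases hm : (PySem.List.sorted A (fun x => x) false).find? (fun x => decide (x ≥ 0)) with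
    | none =>
      exfalso
      have := List.find?_eq_none.mp hm h (hperm.mem_iff.mpr hhA)
      exact this hh0
    | some m =>
      rcases pvFind_props hpair hm with ⟨hmmem, hm0, hmlb⟩
      have hmA : m ∈ A := hperm.mem_iff.mp hmmem
      have hmF : m ∈ A.filter (fun i => decide (i ≥ 0)) := List.mem_filter.mpr ⟨hmA, hm0⟩
      have hminA : PySem.List.min? (A.filter (fun i => decide (i ≥ 0))) (fun x => x)
          = some (t.foldl min h) := by rw [hf]; exact PySem.List.min?_id_cons h t
      have hminMem : t.foldl min h ∈ A.filter (fun i => decide (i ≥ 0)) :=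
        PySem.List.min?_mem hminA
      have h1 : m ≤ t.foldl min h :=
        hmlb _ (hperm.mem_iff.mpr (List.mem_filter.mp hminMem).1) (List.mem_filter.mp hminMem).2
      have h2 : t.foldl min h ≤ m := PySem.List.min?_isMin hminA m hmF
      simp only [List.headI, List.foldl_cons, min_self]
      omega
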